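-- pv_equiv track=rewrite | github.com/kahramani/knapsack | src/knapsack_solver.py | back_tracking_solution
-- ===== SOURCE A (Python) =====
-- def back_tracking_solution(private_key_vector, deciphered_item, best_response):
--     """
--     :param private_key_vector:
--     :param deciphered_item:
--     :param best_response:
--     :return: knapsack solution by recursive algorithm
--     """
--     reference_index = 0
--     editable_deciphered_item = deciphered_item
--     if editable_deciphered_item == 0:
--         return ""
--     else:
--         for i in reversed(private_key_vector):
--             item = i
--             if editable_deciphered_item >= item:
--                 if reference_index == 0:
--                     reference_index = private_key_vector.index(item)
--                 editable_deciphered_item -= item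
--                 best_response = "1" + best_response
--             else:
--                 best_response = "0" + best_response
--         if editable_deciphered_item != 0:
--             best_response = ""
--             if reference_index != 0:
--                 for k in range(0, len(private_key_vector) - reference_index):
--                     best_response = '0' + best_response
--
--                 best_response = back_tracking_solution(private_key_vector[:reference_index], deciphered_item, best_response)
--             else:
--                 return ""
--
--     return best_response
-- ===== SOURCE B (Python) =====
-- def back_tracking_solution(private_key_vector, deciphered_item, best_response):
--     # Iterative reformulation of A's tail recursion: an explicit loop over a
--     # shrinking vector, building each pass's bits in a list instead of string prepends.
--     if deciphered_item == 0:
--         return ""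
--     vec = list(private_key_vector)
--     suffix = best_response
--     while True:
--         bits = []
--         remaining = deciphered_item
--         ref = 0
--         for item in reversed(vec):
--             if remaining >= item:
--                 if ref == 0:
--                     ref = vec.index(item)
--                 remaining -= item
--                 bits.append('1')
--             else:
--                 bits.append('0')
--         if remaining == 0:
--             bits.reverse()
--             return ''.join(bits) + suffix
--         if ref == 0:
--             return ""
--         suffix = '0' * (len(vec) - ref)
--         vec = vec[:ref]
-- ===== Notes on version B (the rewrite author's own statement) =====
-- stated objective: alternative
-- what changed: Replaces A's tail recursion (which rebuilds state by re-entering the function with a sliced list and builds strings by repeated prepends) with an explicit while-loop over a shrinking vector that collects each pass's bits in a list, reversed and joined once.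
import Mathlib
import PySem

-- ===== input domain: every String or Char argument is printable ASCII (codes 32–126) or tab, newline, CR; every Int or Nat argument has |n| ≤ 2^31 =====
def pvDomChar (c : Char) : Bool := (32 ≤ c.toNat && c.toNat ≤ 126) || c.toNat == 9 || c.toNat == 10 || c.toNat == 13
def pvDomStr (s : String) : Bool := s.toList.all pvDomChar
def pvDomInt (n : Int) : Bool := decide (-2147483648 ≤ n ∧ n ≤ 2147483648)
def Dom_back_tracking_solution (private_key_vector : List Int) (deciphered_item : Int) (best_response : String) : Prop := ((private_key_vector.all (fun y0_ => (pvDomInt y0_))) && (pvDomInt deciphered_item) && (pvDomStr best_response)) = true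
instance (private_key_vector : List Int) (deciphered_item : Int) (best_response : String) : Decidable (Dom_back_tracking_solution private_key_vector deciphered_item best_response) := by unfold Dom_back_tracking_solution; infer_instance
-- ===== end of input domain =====

-- B rewrites A's tail recursion as an explicit loop over a shrinking vector, building each
-- pass's bit string as a char list joined once instead of repeated string prepends (objective: alternative).

-- ===== PORT A =====
-- state = (reference_index, editable_deciphered_item, best_response); one step of A's for-loop body.
-- `private_key_vector.index(item)` always succeeds (item ∈ vector), so `.getD 0` is exact.
def stepA (v : List Int) (st : Nat × Int × String) (i : Int) : Nat × Int × String :=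
  if st.2.1 ≥ i then
    ((if st.1 = 0 then (PySem.List.index? v i).getD 0 else st.1), st.2.1 - i, "1" ++ st.2.2)
  else
    (st.1, st.2.1, "0" ++ st.2.2)

-- A's for-loop over reversed(private_key_vector)
def passA (v : List Int) (d : Int) (best : String) : Nat × Int × String :=
  v.reverse.foldl (stepA v) (0, d, best)

-- the reference_index produced by the loop is 0 or a valid index of v (used for termination)
theorem stepA_ref_bound (v : List Int) : ∀ (l : List Int) (st : Nat × Int × String),
    (∀ x ∈ l, x ∈ v) → (st.1 = 0 ∨ st.1 < v.length) →
    ((l.foldl (stepA v) st).1 = 0 ∨ (l.foldl (stepA v) st).1 < v.length) := by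
  intro l
  induction l with
  | nil => intro st _ h; simpa using h
  | cons a l ih =>
    intro st hmem h
    simp only [List.foldl_cons]
    apply ih _ (fun x hx => hmem x (List.mem_cons_of_mem _ hx))
    unfold stepA
    split
    · by_cases h0 : st.1 = 0
      · simp only [h0]
        have ha : a ∈ v := hmem a (List.mem_cons_self ..)
        have hs : (PySem.List.index? v a).isSome := (PySem.List.index?_isSome_iff ..).mpr ha
        obtain ⟨k, hk⟩ := Option.isSome_iff_exists.mp hs
        obtain ⟨hlt, -, -⟩ := PySem.List.getElem_of_index?_eq_some hk
        right
        rw [hk]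
        simpa using hlt
      · simpa [h0] using h
    · exact h

theorem passA_ref_bound (v : List Int) (d : Int) (best : String) :
    (passA v d best).1 = 0 ∨ (passA v d best).1 < v.length :=
  stepA_ref_bound v v.reverse (0, d, best) (by intro x hx; simpa using hx) (Or.inl rfl)

def back_tracking_solution (private_key_vector : List Int) (deciphered_item : Int) (best_response : String) : String :=
  if deciphered_item = 0 then ""
  else
    if (passA private_key_vector deciphered_item best_response).2.1 ≠ 0 then
      if h : (passA private_key_vector deciphered_item best_response).1 ≠ 0 then
        -- the pad argument is A's 'for k in range(0, len - ref): best = '0' + best' loop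
        back_tracking_solution (private_key_vector.take (passA private_key_vector deciphered_item best_response).1)
          deciphered_item
          ((PySem.List.pyRange 0 ((private_key_vector.length : Int) - ((passA private_key_vector deciphered_item best_response).1 : Int)) 1).foldl (fun b _ => "0" ++ b) "")
      else ""
    else (passA private_key_vector deciphered_item best_response).2.2
termination_by private_key_vector.length
decreasing_by
  have hb := passA_ref_bound private_key_vector deciphered_item best_response
  simp only [List.length_take]
  omega

-- ===== PORT B =====
-- state = (bits, remaining, ref); one step of B's inner for-loop over reversed(vec).
def stepB (v : List Int) (st : List Char × Int × Nat) (item : Int) : List Char × Int × Nat :=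
  if st.2.1 ≥ item then
    (st.1 ++ ['1'], st.2.1 - item, if st.2.2 = 0 then (PySem.List.index? v item).getD 0 else st.2.2)
  else
    (st.1 ++ ['0'], st.2.1, st.2.2)

-- B's inner for-loop over reversed(vec)
def passB (v : List Int) (d : Int) : List Char × Int × Nat :=
  v.reverse.foldl (stepB v) ([], d, 0)

theorem stepB_ref_bound (v : List Int) : ∀ (l : List Int) (st : List Char × Int × Nat),
    (∀ x ∈ l, x ∈ v) → (st.2.2 = 0 ∨ st.2.2 < v.length) →
    ((l.foldl (stepB v) st).2.2 = 0 ∨ (l.foldl (stepB v) st).2.2 < v.length) := by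
  intro l
  induction l with
  | nil => intro st _ h; simpa using h
  | cons a l ih =>
    intro st hmem h
    simp only [List.foldl_cons]
    apply ih _ (fun x hx => hmem x (List.mem_cons_of_mem _ hx))
    unfold stepB
    split
    · by_cases h0 : st.2.2 = 0
      · simp only [h0]
        have ha : a ∈ v := hmem a (List.mem_cons_self ..)
        have hs : (PySem.List.index? v a).isSome := (PySem.List.index?_isSome_iff ..).mpr ha
        obtain ⟨k, hk⟩ := Option.isSome_iff_exists.mp hs
        obtain ⟨hlt, -, -⟩ := PySem.List.getElem_of_index?_eq_some hk
        right
        rw [hk]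
        simpa using hlt
      · simpa [h0] using h
    · exact h

theorem passB_ref_bound (v : List Int) (d : Int) :
    (passB v d).2.2 = 0 ∨ (passB v d).2.2 < v.length :=
  stepB_ref_bound v v.reverse ([], d, 0) (by intro x hx; simpa using hx) (Or.inl rfl)

-- the while-True loop of B: each iteration runs one pass over vec, then returns or shrinks vec
def btsLoop (vec : List Int) (d : Int) (suffix : String) : String :=
  if (passB vec d).2.1 = 0 then String.ofList ((passB vec d).1).reverse ++ suffix
  else if (passB vec d).2.2 = 0 then ""
  else btsLoop (vec.take (passB vec d).2.2) d (String.ofList (List.replicate (vec.length - (passB vec d).2.2) '0'))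
termination_by vec.length
decreasing_by
  have hb := passB_ref_bound vec d
  simp only [List.length_take]
  omega

def back_tracking_solution_alt (private_key_vector : List Int) (deciphered_item : Int) (best_response : String) : String :=
  if deciphered_item = 0 then ""
  else btsLoop private_key_vector deciphered_item best_response

-- ===== PRECONDITION & SPEC =====
def Spec_back_tracking_solution (private_key_vector : List Int) (deciphered_item : Int) (best_response : String) (out : String) : Prop := out = back_tracking_solution_alt private_key_vector deciphered_item best_response
instance (private_key_vector : List Int) (deciphered_item : Int) (best_response : String) (out : String) : Decidable (Spec_back_tracking_solution private_key_vector deciphered_item best_response out) := by unfold Spec_back_tracking_solution; infer_instance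

-- ===== CLAIM (what is proved, stated in full; the proofs are below) =====
def Claim_equal_back_tracking_solution : Prop := ∀ (private_key_vector : List Int) (deciphered_item : Int) (best_response : String), Dom_back_tracking_solution private_key_vector deciphered_item best_response → Spec_back_tracking_solution private_key_vector deciphered_item best_response (back_tracking_solution private_key_vector deciphered_item best_response)

-- ===== LEMMAS AND PROOFS =====

theorem str_cons (c : Char) (cs : List Char) :
    String.ofList [c] ++ String.ofList cs = String.ofList (c :: cs) := by
  rw [← String.ofList_append]
  rfl

theorem str_cons_append (c : Char) (cs : List Char) (s : String) :
    String.ofList [c] ++ (String.ofList cs ++ s) = String.ofList (c :: cs) ++ s := by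
  rw [← String.append_assoc, show (c :: cs) = [c] ++ cs from rfl, String.ofList_append]

-- A's fold (prepending to a string) tracks B's fold (appending chars to a list)
theorem pass_fold_eq (v : List Int) (l : List Int) : ∀ (bits : List Char) (rem : Int) (ref : Nat) (s0 : String),
    l.foldl (stepA v) (ref, rem, String.ofList bits.reverse ++ s0) =
    ( (l.foldl (stepB v) (bits, rem, ref)).2.2,
      (l.foldl (stepB v) (bits, rem, ref)).2.1,
      String.ofList ((l.foldl (stepB v) (bits, rem, ref)).1).reverse ++ s0 ) := by
  induction l with
  | nil => intro bits rem ref s0; rfl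
  | cons a l ih =>
    intro bits rem ref s0
    simp only [List.foldl_cons]
    by_cases hge : rem ≥ a
    · have h1 : stepA v (ref, rem, String.ofList bits.reverse ++ s0) a =
        ((if ref = 0 then (PySem.List.index? v a).getD 0 else ref), rem - a,
          String.ofList ((bits ++ ['1']).reverse) ++ s0) := by
        simp only [stepA, if_pos hge, List.reverse_append, List.reverse_cons, List.reverse_nil,
          List.nil_append, List.singleton_append]
        rw [show ("1" : String) = String.ofList ['1'] from rfl, str_cons_append]
      have h2 : stepB v (bits, rem, ref) a =
        (bits ++ ['1'], rem - a, if ref = 0 then (PySem.List.index? v a).getD 0 else ref) := by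
        simp only [stepB, if_pos hge]
      rw [h1, h2, ih]
    · have h1 : stepA v (ref, rem, String.ofList bits.reverse ++ s0) a =
        (ref, rem, String.ofList ((bits ++ ['0']).reverse) ++ s0) := by
        simp only [stepA, if_neg hge, List.reverse_append, List.reverse_cons, List.reverse_nil,
          List.nil_append, List.singleton_append]
        rw [show ("0" : String) = String.ofList ['0'] from rfl, str_cons_append]
      have h2 : stepB v (bits, rem, ref) a = (bits ++ ['0'], rem, ref) := by
        simp only [stepB, if_neg hge]
      rw [h1, h2, ih]

theorem pass_eq (v : List Int) (d : Int) (best : String) :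
    passA v d best = ((passB v d).2.2, (passB v d).2.1, String.ofList ((passB v d).1).reverse ++ best) := by
  have h := pass_fold_eq v v.reverse [] d 0 best
  simpa [passA, passB] using h

-- A's padding loop builds '0' * n
theorem pad_eq : ∀ (n : Nat),
    (PySem.List.pyRange 0 (n : Int) 1).foldl (fun b _ => "0" ++ b) "" = String.ofList (List.replicate n '0') := by
  intro n
  induction n with
  | zero => rfl
  | succ m ih =>
    have hsplit : PySem.List.pyRange 0 ((m : Int) + 1) 1 =
        PySem.List.pyRange 0 (m : Int) 1 ++ [(m : Int)] :=
      PySem.List.pyRange_one_succ_right (by positivity)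
    have hcast : ((m + 1 : Nat) : Int) = (m : Int) + 1 := by push_cast; ring
    rw [hcast, hsplit, List.foldl_append, ih]
    have hrep : List.replicate (m + 1) '0' = '0' :: List.replicate m '0' := rfl
    rw [hrep, ← str_cons]
    rfl

-- main equivalence: for d ≠ 0, A's recursion equals B's loop
theorem main_eq : ∀ (n : Nat) (v : List Int) (d : Int) (best : String), v.length ≤ n → d ≠ 0 →
    back_tracking_solution v d best = btsLoop v d best := by
  intro n
  induction n with
  | zero =>
    intro v d best hlen hd
    have hv : v = [] := List.eq_nil_of_length_eq_zero (Nat.le_zero.mp hlen)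
    subst hv
    rw [back_tracking_solution, btsLoop]
    simp [passA, passB, hd]
  | succ m ih =>
    intro v d best hlen hd
    rw [back_tracking_solution, btsLoop]
    simp only [if_neg hd]
    rw [pass_eq v d best]
    dsimp only
    by_cases hrem : (passB v d).2.1 = 0
    · simp [hrem]
    · rw [if_pos hrem, if_neg hrem]
      by_cases href : (passB v d).2.2 = 0
      · simp [href]
      · have hlt : (passB v d).2.2 < v.length := by
          rcases passB_ref_bound v d with h | h
          · exact absurd h href
          · exact h
        rw [dif_pos href, if_neg href]
        have hpad : (PySem.List.pyRange 0 ((v.length : Int) - ((passB v d).2.2 : Int)) 1).foldl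
            (fun b _ => "0" ++ b) "" = String.ofList (List.replicate (v.length - (passB v d).2.2) '0') := by
          have hc : ((v.length : Int) - ((passB v d).2.2 : Int)) = ((v.length - (passB v d).2.2 : Nat) : Int) := by
            omega
          rw [hc]
          exact pad_eq _
        rw [hpad]
        apply ih
        · simp only [List.length_take]
          omega
        · exact hd

-- ===== VERDICT (by name: the statement is the Claim_ definition above) =====
theorem back_tracking_solution_spec : Claim_equal_back_tracking_solution := by
  intro v d best _
  unfold Spec_back_tracking_solution back_tracking_solution_alt
  by_cases hd : d = 0
  · rw [back_tracking_solution]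
    simp [hd]
  · rw [if_neg hd]
    exact main_eq v.length v d best le_rfl hd
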